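-- pv_equiv track=rewrite | github.com/artyerokhin/3D-Pallet-Packing-Optimizer | src/validation/validators.py | _can_box_fit_on_pallet
-- ===== SOURCE A (Python) =====
-- from typing import Dict, List, Any, Optional
--
-- def _can_box_fit_on_pallet(box: Dict[str, Any], pallet: Dict[str, Any]) -> bool:
--     box_dims = [box.get('length', 0), box.get('width', 0), box.get('height', 0)]
--     pallet_dims = [pallet.get('length', 0), pallet.get('width', 0), pallet.get('height', 0)]
--     for rotation in [(0,1,2), (0,2,1), (1,0,2), (1,2,0), (2,0,1), (2,1,0)]:
--         rotated_dims = [box_dims[rotation[i]] for i in range(3)]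
--         if all(rotated_dims[i] <= pallet_dims[i] for i in range(3)):
--             return True
--     return False
-- ===== SOURCE B (Python) =====
-- def _can_box_fit_on_pallet(box, pallet):
--     bd = sorted([box.get('length', 0), box.get('width', 0), box.get('height', 0)])
--     pd = sorted([pallet.get('length', 0), pallet.get('width', 0), pallet.get('height', 0)])
--     return all(bd[i] <= pd[i] for i in range(3))
-- ===== Notes on version B (the rewrite author's own statement) =====
-- stated objective: simpler
-- what changed: Replaces the enumeration of all 6 axis permutations by sorting the three box and three pallet dimensions once and comparing them component-wise (a box fits in some rotation iff its sorted dims are component-wise <= the pallet's sorted dims).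
import Mathlib
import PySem

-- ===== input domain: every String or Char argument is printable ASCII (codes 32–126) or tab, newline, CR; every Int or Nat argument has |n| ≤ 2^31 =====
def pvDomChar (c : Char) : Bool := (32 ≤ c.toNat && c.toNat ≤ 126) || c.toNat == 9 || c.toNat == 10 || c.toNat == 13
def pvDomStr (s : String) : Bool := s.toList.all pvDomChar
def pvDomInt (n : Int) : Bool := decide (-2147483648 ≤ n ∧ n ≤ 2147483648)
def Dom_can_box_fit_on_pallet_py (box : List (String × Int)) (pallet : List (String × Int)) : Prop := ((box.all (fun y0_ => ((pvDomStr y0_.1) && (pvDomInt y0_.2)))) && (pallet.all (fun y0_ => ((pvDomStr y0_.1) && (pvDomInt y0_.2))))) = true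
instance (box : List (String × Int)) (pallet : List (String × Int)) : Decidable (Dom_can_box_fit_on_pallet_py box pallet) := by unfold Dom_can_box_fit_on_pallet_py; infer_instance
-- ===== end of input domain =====

-- B replaces A's enumeration of all six axis permutations by sorting the three box and three
-- pallet dimensions once and comparing them component-wise (objective: simpler).

-- dict.get(k, 0): first match in the association list, default 0 (both Pythons call box.get / pallet.get)
def pvGet (d : List (String × Int)) (k : String) : Int :=
  match d.find? (fun p => p.1 == k) with
  | some p => p.2
  | none => 0

-- ===== PORT A =====
def can_box_fit_on_pallet_py (box : List (String × Int)) (pallet : List (String × Int)) : Bool :=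
  let box_dims : List Int := [pvGet box "length", pvGet box "width", pvGet box "height"]
  let pallet_dims : List Int := [pvGet pallet "length", pvGet pallet "width", pvGet pallet "height"]
  -- for rotation in [...]: if all(...): return True / return False  ≡  any over the rotation list
  [((0:Nat),(1:Nat),(2:Nat)), (0,2,1), (1,0,2), (1,2,0), (2,0,1), (2,1,0)].any (fun r =>
    let rotated_dims : List Int := [box_dims.getD r.1 0, box_dims.getD r.2.1 0, box_dims.getD r.2.2 0]
    (List.range 3).all (fun i => decide (rotated_dims.getD i 0 ≤ pallet_dims.getD i 0)))

-- ===== PORT B =====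
def can_box_fit_on_pallet_py_alt (box : List (String × Int)) (pallet : List (String × Int)) : Bool :=
  let bd := PySem.List.sorted [pvGet box "length", pvGet box "width", pvGet box "height"] (fun v => v) false
  let pd := PySem.List.sorted [pvGet pallet "length", pvGet pallet "width", pvGet pallet "height"] (fun v => v) false
  (List.range 3).all (fun i => decide (bd.getD i 0 ≤ pd.getD i 0))

-- ===== PRECONDITION & SPEC =====
def Spec_can_box_fit_on_pallet_py (box : List (String × Int)) (pallet : List (String × Int)) (out : Bool) : Prop := out = can_box_fit_on_pallet_py_alt box pallet
instance (box : List (String × Int)) (pallet : List (String × Int)) (out : Bool) : Decidable (Spec_can_box_fit_on_pallet_py box pallet out) := by unfold Spec_can_box_fit_on_pallet_py; infer_instance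

-- ===== CLAIM (what is proved, stated in full; the proofs are below) =====
def Claim_equal_can_box_fit_on_pallet_py : Prop := ∀ (box : List (String × Int)) (pallet : List (String × Int)), Dom_can_box_fit_on_pallet_py box pallet → Spec_can_box_fit_on_pallet_py box pallet (can_box_fit_on_pallet_py box pallet)

-- ===== LEMMAS AND PROOFS =====
-- The whole claim is a statement about the six dimension values; after unfolding both ports and
-- the insertion sort, every ordering case is linear integer arithmetic.
set_option maxHeartbeats 1000000 in
theorem can_box_fit_main (box pallet : List (String × Int)) :
    can_box_fit_on_pallet_py box pallet = can_box_fit_on_pallet_py_alt box pallet := by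
  unfold can_box_fit_on_pallet_py can_box_fit_on_pallet_py_alt
  simp only [PySem.List.sorted, List.foldl, List.any_cons, List.any_nil, List.all_cons,
    List.all_nil, List.range, List.range.loop, List.getD, List.getElem?_cons_zero,
    List.getElem?_cons_succ, Option.getD_some]
  split_ifs <;> (try (simp only [PySem.List.insertBy]; split_ifs)) <;>
    (try (simp only [PySem.List.insertBy]; split_ifs)) <;>
    (apply Bool.eq_iff_iff.mpr; simp_all; try omega)

-- ===== VERDICT (by name: the statement is the Claim_ definition above) =====
theorem can_box_fit_on_pallet_py_spec : Claim_equal_can_box_fit_on_pallet_py := by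
  intro box pallet _
  exact can_box_fit_main box pallet
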